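-- pv_equiv track=rewrite | github.com/OsrsCompanion/AutoFlip | BackupApp/new chat/services/ai_advisor.py | _candidate_item_names
-- ===== SOURCE A (Python) =====
-- from typing import Any
--
-- def _normalize_name(value: Any) -> str:
--     return str(value or "").strip().lower()
--
-- def _unique_names(values: list[str]) -> list[str]:
--     out: list[str] = []
--     seen: set[str] = set()
--     for value in values:
--         cleaned = str(value or "").strip()
--         key = cleaned.lower()
--         if not cleaned or key in seen:
--             continue
--         seen.add(key)
--         out.append(cleaned)
--     return out
--
-- def _candidate_item_names(user_message: str, current_scan: dict[str, Any], recommendations: dict[str, Any]) -> list[str]: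
--     text = _normalize_name(user_message)
--     names: list[str] = []
--
--     for offer in current_scan.get("offers", []) or []:
--         name = str(offer.get("item_name") or "").strip()
--         if name and (_normalize_name(name) in text or not text):
--             names.append(name)
--
--     for bucket_name in ("recommendations", "high_value", "overnight", "anchors", "dump"):
--         for item in recommendations.get(bucket_name, []) or []:
--             name = str(item.get("name") or "").strip()
--             if name and (_normalize_name(name) in text or not text):
--                 names.append(name)
--
--     if user_message.strip():
--         names.append(user_message.strip())
--
--     return _unique_names(names)[:3]
-- ===== SOURCE B (Python) =====
-- def _take_unique(pool, k):
--     # pop the first (key, name), purge every later duplicate of that key, recurse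
--     if not pool or k == 0:
--         return []
--     key, head = pool[0]
--     rest = [p for p in pool[1:] if p[0] != key]
--     return [head] + _take_unique(rest, k - 1)
--
--
-- def _candidate_item_names(user_message: str, current_scan: dict, recommendations: dict) -> list[str]:
--     # Removal-based selection: strip everything up front, filter once, pair each
--     # name with its lowercase key, then take a head and purge its duplicates from
--     # the pool, at most three times. No seen-set, no full dedupe pass, no slice.
--     text = str(user_message or "").strip().lower()
--     cleaned = [str(o.get("item_name") or "").strip() for o in (current_scan.get("offers", []) or [])]
--     for bucket in ("recommendations", "high_value", "overnight", "anchors", "dump"):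
--         cleaned += [str(i.get("name") or "").strip() for i in (recommendations.get(bucket, []) or [])]
--     cleaned.append(str(user_message or "").strip())
--     good = [c for c in cleaned if c and (not text or c.lower() in text)]
--     return _take_unique([(c.lower(), c) for c in good], 3)
-- ===== Notes on version B (the rewrite author's own statement) =====
-- stated objective: alternative
-- what changed: B drops A's seen-set streaming dedupe pass and trailing [:3] slice: it strips and filters the whole candidate stream once, pairs each name with its lowercase key, and then selects by removal - at most three rounds of 'take the head of the pool, purge every later duplicate of its key' - with no seen set and no full dedupe.
import Mathlib
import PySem

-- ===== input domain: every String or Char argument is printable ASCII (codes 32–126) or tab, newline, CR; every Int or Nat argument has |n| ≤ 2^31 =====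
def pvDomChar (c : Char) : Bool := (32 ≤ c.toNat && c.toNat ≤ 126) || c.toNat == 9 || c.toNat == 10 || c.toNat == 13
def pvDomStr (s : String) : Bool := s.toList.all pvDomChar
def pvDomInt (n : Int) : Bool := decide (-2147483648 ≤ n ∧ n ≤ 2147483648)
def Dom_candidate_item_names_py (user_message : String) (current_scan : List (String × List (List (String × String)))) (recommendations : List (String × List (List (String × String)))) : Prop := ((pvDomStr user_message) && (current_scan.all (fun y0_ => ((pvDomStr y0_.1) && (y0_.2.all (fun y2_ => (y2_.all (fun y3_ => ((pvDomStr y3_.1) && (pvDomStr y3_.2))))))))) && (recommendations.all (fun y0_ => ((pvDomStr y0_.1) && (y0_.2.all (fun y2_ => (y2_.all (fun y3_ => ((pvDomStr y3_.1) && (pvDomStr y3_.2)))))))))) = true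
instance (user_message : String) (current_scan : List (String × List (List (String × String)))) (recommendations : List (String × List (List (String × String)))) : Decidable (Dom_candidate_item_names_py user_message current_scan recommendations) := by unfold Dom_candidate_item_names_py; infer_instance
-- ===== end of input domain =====

-- B replaces A's collect / seen-set streaming dedupe pass / slice pipeline by removal-based
-- selection: strip and filter once, then at most three rounds of "take the head, purge its
-- duplicates from the pool" (objective: alternative decomposition, same result).

-- ===== PORT A =====
-- _normalize_name(value) ('value or ""' is the identity on str arguments up to the empty string, which strip/lower fix)
def normalize_name_py (value : String) : String :=
  PySem.Str.lower (PySem.Str.strip value)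

-- the loop of _unique_names, threading its state (out, seen)
def unique_names_loop : List String → List String × PySem.Set String → List String × PySem.Set String
  | [], st => st
  | value :: rest, st =>
    let cleaned := PySem.Str.strip value
    let key := PySem.Str.lower cleaned
    if cleaned = "" ∨ PySem.Set.contains st.2 key then
      unique_names_loop rest st
    else
      unique_names_loop rest (st.1 ++ [cleaned], PySem.Set.add st.2 key)

def unique_names_py (values : List String) : List String :=
  (unique_names_loop values ([], PySem.Set.empty)).1

def candidate_item_names_py (user_message : String) (current_scan : List (String × List (List (String × String)))) (recommendations : List (String × List (List (String × String)))) : List String :=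
  let text := normalize_name_py user_message
  let names := (PySem.Dict.getD (PySem.Dict.mk current_scan) "offers" []).foldl (fun names offer =>
      let name := PySem.Str.strip (PySem.Dict.getD (PySem.Dict.mk offer) "item_name" "")
      if name ≠ "" ∧ (PySem.Str.isIn (normalize_name_py name) text ∨ text = "") then names ++ [name] else names)
    []
  let names := ["recommendations", "high_value", "overnight", "anchors", "dump"].foldl (fun names bucket_name =>
      (PySem.Dict.getD (PySem.Dict.mk recommendations) bucket_name []).foldl (fun names item =>
        let name := PySem.Str.strip (PySem.Dict.getD (PySem.Dict.mk item) "name" "")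
        if name ≠ "" ∧ (PySem.Str.isIn (normalize_name_py name) text ∨ text = "") then names ++ [name] else names)
      names)
    names
  let names := if PySem.Str.strip user_message ≠ "" then names ++ [PySem.Str.strip user_message] else names
  (unique_names_py names).take 3

-- ===== PORT B =====
-- _take_unique(pool, k): pop the first (key, name), purge later duplicates of that key, recurse
def take_unique : List (String × String) → Nat → List String
  | [], _ => []
  | _ :: _, 0 => []
  | (key, head) :: tail, Nat.succ k =>
    head :: take_unique (tail.filter (fun p => p.1 != key)) k

def candidate_item_names_py_alt (user_message : String) (current_scan : List (String × List (List (String × String)))) (recommendations : List (String × List (List (String × String)))) : List String :=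
  let text := PySem.Str.lower (PySem.Str.strip user_message)
  let cleaned := (PySem.Dict.getD (PySem.Dict.mk current_scan) "offers" []).map
    (fun o => PySem.Str.strip (PySem.Dict.getD (PySem.Dict.mk o) "item_name" ""))
  let cleaned := ["recommendations", "high_value", "overnight", "anchors", "dump"].foldl (fun acc bucket =>
      acc ++ (PySem.Dict.getD (PySem.Dict.mk recommendations) bucket []).map
        (fun i => PySem.Str.strip (PySem.Dict.getD (PySem.Dict.mk i) "name" "")))
    cleaned
  let cleaned := cleaned ++ [PySem.Str.strip user_message]
  let good := cleaned.filter (fun c => c != "" && (text == "" || PySem.Str.isIn (PySem.Str.lower c) text))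
  take_unique (good.map (fun c => (PySem.Str.lower c, c))) 3

-- ===== PRECONDITION & SPEC =====
def Spec_candidate_item_names_py (user_message : String) (current_scan : List (String × List (List (String × String)))) (recommendations : List (String × List (List (String × String)))) (out : List String) : Prop := out = candidate_item_names_py_alt user_message current_scan recommendations
instance (user_message : String) (current_scan : List (String × List (List (String × String)))) (recommendations : List (String × List (List (String × String)))) (out : List String) : Decidable (Spec_candidate_item_names_py user_message current_scan recommendations out) := by unfold Spec_candidate_item_names_py; infer_instance

-- ===== CLAIM (what is proved, stated in full; the proofs are below) =====
def Claim_equal_candidate_item_names_py : Prop := ∀ (user_message : String) (current_scan : List (String × List (List (String × String)))) (recommendations : List (String × List (List (String × String)))), Dom_candidate_item_names_py user_message current_scan recommendations → Spec_candidate_item_names_py user_message current_scan recommendations (candidate_item_names_py user_message current_scan recommendations)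

-- ===== LEMMAS AND PROOFS =====

-- strip is idempotent (on the List Char side, then lifted to String)
lemma chars_strip_idem (s : List Char) :
    PySem.Chars.strip (PySem.Chars.strip s) = PySem.Chars.strip s := by
  unfold PySem.Chars.strip PySem.Chars.rstrip PySem.Chars.lstrip
  set p := PySem.Chars.isspace with hp
  set t := (List.dropWhile p (List.dropWhile p s).reverse).reverse with ht
  have hrev : t.reverse = List.dropWhile p (List.dropWhile p s).reverse := by
    simp [ht]
  have hlst : List.dropWhile p t = t := by
    rcases Decidable.em (t = []) with h0 | h0
    · simp [h0]
    · have hpre : t <+: List.dropWhile p s := by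
        rw [← List.reverse_suffix]
        rw [hrev]
        exact List.dropWhile_suffix p
      rw [List.dropWhile_eq_self_iff]
      intro hl
      have := hpre.getElem (i := 0) (by simpa using hl)
      rw [this]
      have h2 := (List.dropWhile_eq_self_iff (p := p) (l := List.dropWhile p s)).mp
        (List.dropWhile_idempotent p s)
      exact h2 _
  rw [hlst, hrev, List.dropWhile_idempotent, ← hrev, List.reverse_reverse]

lemma str_strip_idem (s : String) :
    PySem.Str.strip (PySem.Str.strip s) = PySem.Str.strip s := by
  show String.ofList (PySem.Chars.strip (PySem.Str.strip s).toList) = PySem.Str.strip s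
  rw [PySem.Str.toList_strip, chars_strip_idem]
  rfl

lemma str_isIn_self (t : String) : PySem.Str.isIn t t = true :=
  (PySem.Str.isIn_iff_infix t t).mpr (List.infix_refl _)

-- A's per-element filter as an Option-valued map
def pvG (text raw : String) : Option String :=
  let n := PySem.Str.strip raw
  if n ≠ "" ∧ (PySem.Str.isIn (normalize_name_py n) text ∨ text = "") then some n else none

-- B's filter predicate (the comprehension's condition)
def pvCond (text c : String) : Bool := c != "" && (text == "" || PySem.Str.isIn (PySem.Str.lower c) text)

-- full removal-based dedupe (proof-only reference: B stops after three rounds)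
def removal : List String → List String
  | [] => []
  | x :: t => x :: removal (t.filter (fun n => PySem.Str.lower n != PySem.Str.lower x))
termination_by l => l.length
decreasing_by simpa using Nat.lt_succ_of_le (t.length_filter_le _)

-- A's conditional-append foldl builds exactly the filterMap of the raw names
lemma foldl_step_filterMap {α : Type} (text : String) (f : α → String) (items : List α) (acc : List String) :
    items.foldl (fun names it =>
        let name := PySem.Str.strip (f it)
        if name ≠ "" ∧ (PySem.Str.isIn (normalize_name_py name) text ∨ text = "") then names ++ [name] else names)
      acc = acc ++ (items.map f).filterMap (pvG text) := by
  induction items generalizing acc with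
  | nil => simp
  | cons it rest ih =>
    simp only [List.foldl_cons, List.map_cons, List.filterMap_cons]
    by_cases h : PySem.Str.strip (f it) ≠ "" ∧
        (PySem.Str.isIn (normalize_name_py (PySem.Str.strip (f it))) text ∨ text = "")
    · rw [if_pos h]
      have hg : pvG text (f it) = some (PySem.Str.strip (f it)) := by
        simp only [pvG]; rw [if_pos h]
      rw [hg, ih]
      simp
    · rw [if_neg h]
      have hg : pvG text (f it) = none := by
        simp only [pvG]; rw [if_neg h]
      rw [hg, ih]

-- A's filterMap of raw names = B's filter of the stripped names
lemma filterMap_pvG (text : String) (l : List String) :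
    l.filterMap (pvG text) = (l.map PySem.Str.strip).filter (pvCond text) := by
  induction l with
  | nil => rfl
  | cons x t ih =>
    have hn : normalize_name_py (PySem.Str.strip x) = PySem.Str.lower (PySem.Str.strip x) := by
      rw [normalize_name_py, str_strip_idem]
    by_cases h1 : PySem.Str.strip x = ""
    · have hg : pvG text x = none := by
        simp only [pvG]; rw [if_neg]; rintro ⟨c, _⟩; exact c h1
      have hc : pvCond text (PySem.Str.strip x) = false := by simp [pvCond, h1]
      simp [hg, hc, ih]
    · by_cases h2 : PySem.Str.isIn (PySem.Str.lower (PySem.Str.strip x)) text = true ∨ text = ""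
      · have hg : pvG text x = some (PySem.Str.strip x) := by
          simp only [pvG]; rw [if_pos ⟨h1, by rw [hn]; exact h2⟩]
        have hc : pvCond text (PySem.Str.strip x) = true := by
          rcases h2 with h2 | h2
          · simp only [pvCond, h2, Bool.or_true]; simp [h1]
          · simp only [pvCond, h2]; simp [h1]
        simp [hg, hc, ih]
      · push_neg at h2
        have hIs : PySem.Str.isIn (PySem.Str.lower (PySem.Str.strip x)) text = false :=
          Bool.eq_false_iff.mpr h2.1
        have hg : pvG text x = none := by
          simp only [pvG]; rw [if_neg]
          rintro ⟨c, h3 | h3⟩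
          · rw [hn] at h3; rw [h3] at hIs; cases hIs
          · exact h2.2 h3
        have hc : pvCond text (PySem.Str.strip x) = false := by
          have ht : (text == "") = false := by
            rw [Bool.eq_false_iff]; exact fun hb => h2.2 (by simpa using hb)
          simp only [pvCond, hIs, ht, Bool.or_self, Bool.and_false]
        simp [hg, hc, ih]

-- contains on Set.add, as a Bool identity
lemma set_contains_add (s : PySem.Set String) (k v : String) :
    PySem.Set.contains (PySem.Set.add s k) v = (PySem.Set.contains s v || v == k) := by
  rcases Decidable.em (v ∈ s) with hs | hs
  · rw [(PySem.Set.contains_iff _ _).mpr ((PySem.Set.mem_add _ _ _).mpr (Or.inl hs)),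
      (PySem.Set.contains_iff _ _).mpr hs]
    simp
  · rcases Decidable.em (v = k) with hk | hk
    · rw [(PySem.Set.contains_iff _ _).mpr ((PySem.Set.mem_add _ _ _).mpr (Or.inr hk))]
      simp [hk]
    · have h1 : PySem.Set.contains (PySem.Set.add s k) v = false := by
        rw [Bool.eq_false_iff]
        intro hc
        rcases (PySem.Set.mem_add _ _ _).mp ((PySem.Set.contains_iff _ _).mp hc) with m | m
        · exact hs m
        · exact hk m
      have h2 : PySem.Set.contains s v = false := by
        rw [Bool.eq_false_iff]
        exact fun hc => hs ((PySem.Set.contains_iff _ _).mp hc)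
      rw [h1, h2]
      simp [hk]

-- the streaming seen-set dedupe of A equals removal-based dedupe of the not-yet-seen part
lemma uniq_eq_removal (l : List String) (out : List String) (s : PySem.Set String)
    (h : ∀ x ∈ l, PySem.Str.strip x = x) :
    (unique_names_loop l (out, s)).1 =
      out ++ removal (l.filter (fun x => x != "" && !(PySem.Set.contains s (PySem.Str.lower x)))) := by
  induction l generalizing out s with
  | nil => simp [unique_names_loop, removal]
  | cons x t ih =>
    have hx : PySem.Str.strip x = x := h x (by simp)
    have ht : ∀ y ∈ t, PySem.Str.strip y = y := fun y hy => h y (by simp [hy])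
    simp only [unique_names_loop, List.filter_cons, hx]
    by_cases h1 : x = ""
    · rw [if_pos (Or.inl h1)]
      have : (x != "" && !(PySem.Set.contains s (PySem.Str.lower x))) = false := by simp [h1]
      rw [this]
      simp only [Bool.false_eq_true, if_false]
      exact ih out s ht
    · by_cases h2 : PySem.Set.contains s (PySem.Str.lower x)
      · rw [if_pos (Or.inr h2)]
        have : (x != "" && !(PySem.Set.contains s (PySem.Str.lower x))) = false := by
          rw [h2]; simp
        rw [this]
        simp only [Bool.false_eq_true, if_false]
        exact ih out s ht
      · rw [if_neg (fun hc => hc.elim h1 h2)]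
        have : (x != "" && !(PySem.Set.contains s (PySem.Str.lower x))) = true := by
          rw [Bool.eq_false_iff.mpr h2]; simp [h1]
        rw [this]
        simp only [if_true]
        rw [ih (out ++ [x]) _ ht, removal]
        have hfilt : List.filter (fun n => PySem.Str.lower n != PySem.Str.lower x)
            (List.filter (fun y => y != "" && !(PySem.Set.contains s (PySem.Str.lower y))) t)
            = List.filter (fun y => y != "" &&
                !(PySem.Set.contains (PySem.Set.add s (PySem.Str.lower x)) (PySem.Str.lower y))) t := by
          rw [List.filter_filter]
          apply List.filter_congr
          intro y _
          rw [set_contains_add]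
          simp only [bne, Bool.not_or]
          cases (y == "") <;> cases PySem.Set.contains s (PySem.Str.lower y) <;>
            cases (PySem.Str.lower y == PySem.Str.lower x) <;> rfl
        rw [hfilt]
        simp

-- B's bounded selection is the k-prefix of the full removal dedupe
lemma take_unique_aux (n : Nat) : ∀ (l : List String), l.length ≤ n → ∀ k : Nat,
    take_unique (l.map (fun c => (PySem.Str.lower c, c))) k = (removal l).take k := by
  induction n with
  | zero =>
    intro l hl k
    rw [List.length_eq_zero_iff.mp (Nat.le_zero.mp hl)]
    cases k <;> simp [take_unique, removal]
  | succ n ih =>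
    intro l hl k
    cases l with
    | nil => cases k <;> simp [take_unique, removal]
    | cons x t =>
      cases k with
      | zero => simp [take_unique, removal]
      | succ k =>
        simp only [List.map_cons, take_unique, removal, List.take_succ_cons]
        rw [List.filter_map]
        have hco : ((fun p : String × String => p.1 != PySem.Str.lower x) ∘
            fun c => (PySem.Str.lower c, c)) = fun n => PySem.Str.lower n != PySem.Str.lower x := rfl
        rw [hco, ih _ (Nat.le_trans (List.length_filter_le _ _) (Nat.le_of_succ_le_succ hl))]

lemma take_unique_eq_take_removal (l : List String) (k : Nat) :
    take_unique (l.map (fun c => (PySem.Str.lower c, c))) k = (removal l).take k :=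
  take_unique_aux l.length l (Nat.le_refl _) k

-- ===== VERDICT (by name: the statement is the Claim_ definition above) =====
theorem candidate_item_names_py_spec : Claim_equal_candidate_item_names_py := by
  intro user_message current_scan recommendations _
  show candidate_item_names_py user_message current_scan recommendations =
    candidate_item_names_py_alt user_message current_scan recommendations
  unfold candidate_item_names_py candidate_item_names_py_alt unique_names_py
  rw [show normalize_name_py user_message = PySem.Str.lower (PySem.Str.strip user_message) from rfl]
  simp only [foldl_step_filterMap, List.nil_append]
  rw [PySem.List.foldl_append_eq_flatMap
      (fun bucket_name => ((PySem.Dict.getD (PySem.Dict.mk recommendations) bucket_name []).map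
        (fun item => PySem.Dict.getD (PySem.Dict.mk item) "name" "")).filterMap
          (pvG (PySem.Str.lower (PySem.Str.strip user_message)))),
    PySem.List.foldl_append_eq_flatMap
      (fun bucket => (PySem.Dict.getD (PySem.Dict.mk recommendations) bucket []).map
        (fun i => PySem.Str.strip (PySem.Dict.getD (PySem.Dict.mk i) "name" "")))]
  rw [← List.filterMap_flatMap, ← List.filterMap_append]
  set text := PySem.Str.lower (PySem.Str.strip user_message) with htext
  set L := ((PySem.Dict.getD (PySem.Dict.mk current_scan) "offers" []).map
      (fun offer => PySem.Dict.getD (PySem.Dict.mk offer) "item_name" "")) ++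
    (["recommendations", "high_value", "overnight", "anchors", "dump"].flatMap
      (fun bucket_name => (PySem.Dict.getD (PySem.Dict.mk recommendations) bucket_name []).map
        (fun item => PySem.Dict.getD (PySem.Dict.mk item) "name" ""))) with hL
  have htail : ∀ (names : List String),
      (if PySem.Str.strip user_message ≠ "" then names ++ [PySem.Str.strip user_message] else names) =
        names ++ (if PySem.Str.strip user_message ≠ "" then [PySem.Str.strip user_message] else []) := by
    intro names; split <;> simp
  rw [htail]
  -- B's filter predicate is pvCond, and B's stripped stream is L.map strip ++ [strip um]
  have hpc : (fun c => c != "" && (text == "" || PySem.Str.isIn (PySem.Str.lower c) text)) =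
      pvCond text := rfl
  rw [hpc]
  have hmap : ((PySem.Dict.getD (PySem.Dict.mk current_scan) "offers" []).map
        (fun o => PySem.Str.strip (PySem.Dict.getD (PySem.Dict.mk o) "item_name" "")) ++
      (["recommendations", "high_value", "overnight", "anchors", "dump"].flatMap
        (fun bucket => (PySem.Dict.getD (PySem.Dict.mk recommendations) bucket []).map
          (fun i => PySem.Str.strip (PySem.Dict.getD (PySem.Dict.mk i) "name" ""))))) ++
      [PySem.Str.strip user_message] = L.map PySem.Str.strip ++ [PySem.Str.strip user_message] := by
    rw [hL, List.map_append, List.map_flatMap]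
    simp [List.map_map, Function.comp_def]
  rw [hmap]
  -- the trailing segment is the filtered singleton
  have hseg : List.filter (pvCond text) [PySem.Str.strip user_message] =
      (if PySem.Str.strip user_message ≠ "" then [PySem.Str.strip user_message] else []) := by
    by_cases h : PySem.Str.strip user_message = ""
    · rw [if_neg (fun hc => hc h)]
      simp [pvCond, h]
    · rw [if_pos h]
      have hc : pvCond text (PySem.Str.strip user_message) = true := by
        simp only [pvCond, htext, str_isIn_self, Bool.or_true]
        simp [h]
      simp [List.filter, hc]
  rw [filterMap_pvG, List.filter_append, hseg]
  set good := (L.map PySem.Str.strip).filter (pvCond text) ++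
    (if PySem.Str.strip user_message ≠ "" then [PySem.Str.strip user_message] else []) with hgood
  -- every element of good is strip-fixed and nonempty, and was filtered by pvCond or is strip um
  have hfix : ∀ x ∈ good, PySem.Str.strip x = x := by
    intro x hx
    rw [hgood] at hx
    rcases List.mem_append.mp hx with hx | hx
    · rcases List.mem_map.mp (List.mem_of_mem_filter hx) with ⟨y, _, hy⟩
      rw [← hy, str_strip_idem]
    · rcases Decidable.em (PySem.Str.strip user_message ≠ "") with h | h
      · rw [if_pos h] at hx
        rw [List.mem_singleton.mp hx, str_strip_idem]
      · rw [if_neg h] at hx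
        cases hx
  have hne : ∀ x ∈ good, (x != "" && !(PySem.Set.contains PySem.Set.empty (PySem.Str.lower x))) = true := by
    intro x hx
    have hxne : (x != "") = true := by
      rw [hgood] at hx
      rcases List.mem_append.mp hx with hx | hx
      · have := List.of_mem_filter hx
        exact ((Bool.and_eq_true _ _).mp this).1
      · rcases Decidable.em (PySem.Str.strip user_message ≠ "") with h | h
        · rw [if_pos h] at hx
          rw [List.mem_singleton.mp hx]
          simp [h]
        · rw [if_neg h] at hx
          cases hx
    rw [hxne]
    rfl
  rw [uniq_eq_removal good [] PySem.Set.empty hfix, List.filter_eq_self.mpr hne,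
    List.nil_append, take_unique_eq_take_removal]
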